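-- pv_equiv track=rewrite | github.com/APEvul-cyber/modbus_openplc_vul | fc05_write_single_coil_output_addr/poc.py | parse_fc01_resp
-- ===== SOURCE A (Python) =====
-- def parse_fc01_resp(resp):
--     if len(resp) < 10:
--         return None, "响应过短"
--     fc = resp[7]
--     if fc == 0x81:
--         return None, f"读取异常: 0x{resp[8]:02X}"
--     if fc == 0x01:
--         bc = resp[8]
--         bits = []
--         for i in range(bc):
--             byte_val = resp[9 + i]
--             for bit in range(8):
--                 bits.append((byte_val >> bit) & 1)
--         return bits, "成功"
--     return None, f"未知FC: 0x{fc:02X}"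
-- ===== SOURCE B (Python) =====
-- def parse_fc01_resp(resp):
--     if len(resp) < 10:
--         return None, "响应过短"
--     fc = resp[7]
--     if fc == 0x81:
--         return None, f"读取异常: 0x{resp[8]:02X}"
--     if fc != 0x01:
--         return None, f"未知FC: 0x{fc:02X}"
--     bits = []
--     for i in range(resp[8]):
--         bits.extend(int(c) for c in format(resp[9 + i] % 256, '08b')[::-1])
--     return bits, "成功"
-- ===== Notes on version B (the rewrite author's own statement) =====
-- stated objective: idiomatic
-- what changed: The nested bit-shift loop is replaced by per-byte string formatting: each byte is reduced mod 256 and rendered with format(.., '08b'), reversed to LSB-first and mapped through int(); guard order for the unknown-FC case is an early return.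
import Mathlib
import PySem

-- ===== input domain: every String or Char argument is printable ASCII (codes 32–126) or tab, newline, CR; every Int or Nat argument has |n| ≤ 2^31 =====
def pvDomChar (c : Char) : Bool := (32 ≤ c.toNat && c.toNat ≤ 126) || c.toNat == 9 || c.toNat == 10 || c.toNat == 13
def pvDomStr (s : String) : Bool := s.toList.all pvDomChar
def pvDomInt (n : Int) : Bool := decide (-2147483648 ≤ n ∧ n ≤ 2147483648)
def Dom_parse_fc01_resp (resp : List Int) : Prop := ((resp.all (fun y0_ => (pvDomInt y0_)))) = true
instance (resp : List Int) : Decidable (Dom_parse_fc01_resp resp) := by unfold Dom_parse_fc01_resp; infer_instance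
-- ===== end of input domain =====

-- B replaces A's nested bit-shift loops by per-byte binary string formatting (format(b % 256, '08b'),
-- reversed to LSB-first); objective: idiomatic. Equivalence is over the return value on inputs where A returns.

-- ===== PORT A =====
-- Python f"{n:02X}": uppercase hex, zero-padded to width 2 ('-' counts toward the width).
-- Hand-written (PySem has no hex format); exact for every Int. Used by both ports (both Pythons
-- contain the identical f-strings).
def hexDigit (n : Nat) : Char := "0123456789ABCDEF".toList.getD n '?'
def hexChars (n : Nat) : List Char :=
  if _h : n < 16 then [hexDigit n]
  else hexChars (n / 16) ++ [hexDigit (n % 16)]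
def fmt02X (n : Int) : String :=
  if n < 0 then String.ofList ('-' :: hexChars n.natAbs)
  else String.ofList (List.replicate (2 - (hexChars n.toNat).length) '0' ++ hexChars n.toNat)

def parse_fc01_resp (resp : List Int) : Option (List Int) × String :=
  if resp.length < 10 then (none, "响应过短")
  else
    let fc := PySem.List.pyGetD resp 7 0
    if fc = 129 then (none, "读取异常: 0x" ++ fmt02X (PySem.List.pyGetD resp 8 0))
    else if fc = 1 then
      let bc := PySem.List.pyGetD resp 8 0
      let bits := (PySem.List.pyRange 0 bc 1).foldl (fun acc i =>
        let byteVal := PySem.List.pyGetD resp (9 + i) 0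
        (PySem.List.pyRange 0 8 1).foldl
          (fun acc2 bit => acc2 ++ [PySem.Int.band (byteVal >>> bit.toNat) 1]) acc) []
      (some bits, "成功")
    else (none, "未知FC: 0x" ++ fmt02X fc)

-- ===== PORT B =====
-- int(c) for a binary digit char c, ported as its code minus 48 (exact on '0'/'1').
def byteBits (b : Int) : List Int :=
  let s := PySem.Int.toBinChars (PySem.Int.mod b 256)      -- format(b % 256, 'b'); b % 256 ≥ 0
  let padded := List.replicate (8 - s.length) '0' ++ s     -- '08b' zero padding
  padded.reverse.map (fun c => ((c.toNat - 48 : Nat) : Int))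

def parse_fc01_resp_alt (resp : List Int) : Option (List Int) × String :=
  if resp.length < 10 then (none, "响应过短")
  else
    let fc := PySem.List.pyGetD resp 7 0
    if fc = 129 then (none, "读取异常: 0x" ++ fmt02X (PySem.List.pyGetD resp 8 0))
    else if fc ≠ 1 then (none, "未知FC: 0x" ++ fmt02X fc)
    else
      let bits := (PySem.List.pyRange 0 (PySem.List.pyGetD resp 8 0) 1).foldl
        (fun acc i => acc ++ byteBits (PySem.List.pyGetD resp (9 + i) 0)) []
      (some bits, "成功")

-- ===== PRECONDITION & SPEC =====
-- Pre_ excludes exactly the inputs where Python A raises IndexError (fc == 1 and the byte count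
-- resp[8] exceeds the bytes actually present); B raises there too.
def Pre_parse_fc01_resp (resp : List Int) : Prop :=
  resp.length < 10 ∨ PySem.List.pyGetD resp 7 0 ≠ 1 ∨
    PySem.List.pyGetD resp 8 0 ≤ (resp.length : Int) - 9
instance (resp : List Int) : Decidable (Pre_parse_fc01_resp resp) := by
  unfold Pre_parse_fc01_resp; infer_instance
def pvWitness_parse_fc01_resp : List Int := [0, 0, 0, 0, 0, 0, 0, 1, 1, 5, 0]

def Spec_parse_fc01_resp (resp : List Int) (out : Option (List Int) × String) : Prop := out = parse_fc01_resp_alt resp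
instance (resp : List Int) (out : Option (List Int) × String) : Decidable (Spec_parse_fc01_resp resp out) := by unfold Spec_parse_fc01_resp; infer_instance

-- ===== CLAIM (what is proved, stated in full; the proofs are below) =====
def Claim_equal_parse_fc01_resp : Prop := ∀ (resp : List Int), Dom_parse_fc01_resp resp → Pre_parse_fc01_resp resp → Spec_parse_fc01_resp resp (parse_fc01_resp resp)

-- ===== LEMMAS AND PROOFS =====

-- the low 8 bits of b are the bits of b % 256
lemma shift_band_mod (b : Int) (k : Nat) (hk : k < 8) :
    PySem.Int.band (b >>> ((k : Nat) : Int)) 1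
      = PySem.Int.band (PySem.Int.mod b 256 >>> ((k : Nat) : Int)) 1 := by
  rw [PySem.Int.band_one, PySem.Int.band_one,
      PySem.Int.mod_eq_emod_of_pos (by norm_num : (0:Int) < 2),
      PySem.Int.mod_eq_emod_of_pos (by norm_num : (0:Int) < 2),
      PySem.Int.mod_eq_emod_of_pos (by norm_num : (0:Int) < 256)]
  cases b with
  | ofNat m =>
      have h1 : (Int.ofNat m) % 256 = ((m % 256 : Nat) : Int) := by
        rw [Int.ofNat_eq_natCast]; omega
      rw [h1, Int.ofNat_eq_natCast, Int.shiftRight_natCast, Int.shiftRight_natCast]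
      have hnat : (m >>> k) % 2 = ((m % 256) >>> k) % 2 := by
        simp only [Nat.shiftRight_eq_div_pow]; interval_cases k <;> omega
      omega
  | negSucc m =>
      have h1 : (Int.negSucc m) % 256 = ((255 - m % 256 : Nat) : Int) := by
        rw [Int.negSucc_eq]; omega
      rw [h1, Int.shiftRight_negSucc, Int.shiftRight_natCast, Int.negSucc_eq]
      simp only [Nat.shiftRight_eq_div_pow]
      interval_cases k <;> push_cast <;> omega

-- for 0 ≤ m < 256 the eight shifted bits are exactly byteBits
set_option maxRecDepth 40000 in
lemma byteBits_of_lt (n : Nat) (hn : n < 256) :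
    [PySem.Int.band ((n : Int) >>> (((0:Nat)):Int)) 1, PySem.Int.band ((n : Int) >>> (((1:Nat)):Int)) 1,
     PySem.Int.band ((n : Int) >>> (((2:Nat)):Int)) 1, PySem.Int.band ((n : Int) >>> (((3:Nat)):Int)) 1,
     PySem.Int.band ((n : Int) >>> (((4:Nat)):Int)) 1, PySem.Int.band ((n : Int) >>> (((5:Nat)):Int)) 1,
     PySem.Int.band ((n : Int) >>> (((6:Nat)):Int)) 1, PySem.Int.band ((n : Int) >>> (((7:Nat)):Int)) 1] =
    byteBits (n : Int) := by
  revert hn; revert n; decide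

lemma inner_loop_eq (b : Int) (acc : List Int) :
    (PySem.List.pyRange 0 8 1).foldl
      (fun acc2 bit => acc2 ++ [PySem.Int.band (b >>> bit.toNat) 1]) acc = acc ++ byteBits b := by
  have h0 : (0:Int) ≤ PySem.Int.mod b 256 := PySem.Int.mod_nonneg b (by norm_num)
  have h1 : PySem.Int.mod b 256 < 256 := PySem.Int.mod_lt b (by norm_num)
  have hcast : (((PySem.Int.mod b 256).toNat : Int)) = PySem.Int.mod b 256 := Int.toNat_of_nonneg h0
  have hn256 : (PySem.Int.mod b 256).toNat < 256 := by omega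
  have hbit : ∀ k : Nat, k < 8 → PySem.Int.band (b >>> ((k : Nat) : Int)) 1
      = PySem.Int.band (((PySem.Int.mod b 256).toNat : Int) >>> ((k : Nat) : Int)) 1 := by
    intro k hk; rw [hcast]; exact shift_band_mod b k hk
  have hbb : byteBits ((PySem.Int.mod b 256).toNat : Int) = byteBits b := by
    unfold byteBits
    have hm : PySem.Int.mod (((PySem.Int.mod b 256).toNat : Int)) 256 = PySem.Int.mod b 256 := by
      rw [PySem.Int.mod_eq_emod_of_pos (by norm_num : (0:Int) < 256), hcast]
      exact Int.emod_eq_of_lt h0 h1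
    rw [hm]
  rw [show PySem.List.pyRange 0 8 1 = [0,1,2,3,4,5,6,7] from by decide]
  simp only [List.foldl_cons, List.foldl_nil, List.append_assoc, List.cons_append,
    List.nil_append, List.singleton_append]
  rw [show ((0:Int)).toNat = 0 from rfl, show ((1:Int)).toNat = 1 from rfl,
      show ((2:Int)).toNat = 2 from rfl, show ((3:Int)).toNat = 3 from rfl,
      show ((4:Int)).toNat = 4 from rfl, show ((5:Int)).toNat = 5 from rfl,
      show ((6:Int)).toNat = 6 from rfl, show ((7:Int)).toNat = 7 from rfl]
  rw [hbit 0 (by norm_num), hbit 1 (by norm_num), hbit 2 (by norm_num), hbit 3 (by norm_num),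
      hbit 4 (by norm_num), hbit 5 (by norm_num), hbit 6 (by norm_num), hbit 7 (by norm_num),
      ← hbb, ← byteBits_of_lt _ hn256]

-- ===== VERDICT (by name: the statement is the Claim_ definition above) =====
theorem parse_fc01_resp_spec : Claim_equal_parse_fc01_resp := by
  intro resp _ _
  unfold Spec_parse_fc01_resp parse_fc01_resp parse_fc01_resp_alt
  by_cases h10 : resp.length < 10
  · simp [h10]
  · by_cases h81 : PySem.List.pyGetD resp 7 0 = 129
    · simp [h10, h81]
    · by_cases h1 : PySem.List.pyGetD resp 7 0 = 1
      · have hfun : (fun (acc : List Int) (i : Int) =>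
            (PySem.List.pyRange 0 8 1).foldl
              (fun acc2 bit => acc2 ++ [PySem.Int.band ((PySem.List.pyGetD resp (9 + i) 0) >>> bit.toNat) 1]) acc)
            = fun acc i => acc ++ byteBits (PySem.List.pyGetD resp (9 + i) 0) :=
          funext fun acc => funext fun i => inner_loop_eq _ acc
        simp only [h10, h1, if_false, if_true, ne_eq, not_true_eq_false]
        rw [hfun]
      · simp [h10, h81, h1]
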